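-- pv_equiv track=rewrite | github.com/Chia-Network/hsms | src/validation/Conditions.py | conditions_by_opcode
-- ===== SOURCE A (Python) =====
-- def conditions_by_opcode(conditions):
--     opcodes = sorted(set([_[0] for _ in conditions if len(_) > 0]))
--     d = {}
--     for _ in opcodes:
--         d[_] = list()
--     for _ in conditions:
--         d[_[0]].append(_)
--     return d
-- ===== SOURCE B (Python) =====
-- def conditions_by_opcode(conditions):
--     d = {}
--     remaining = list(conditions)
--     while remaining:
--         k = min(c[0] for c in remaining)
--         d[k] = [c for c in remaining if c[0] == k]
--         remaining = [c for c in remaining if c[0] != k]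
--     return d
-- ===== Notes on version B (the rewrite author's own statement) =====
-- stated objective: alternative
-- what changed: B replaces A's three phases (sorted-unique opcode list, pre-allocation loop, fill loop) by a selection-style while loop that repeatedly extracts the minimum remaining opcode together with its whole group, so keys come out sorted without any sort call.
import Mathlib
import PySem

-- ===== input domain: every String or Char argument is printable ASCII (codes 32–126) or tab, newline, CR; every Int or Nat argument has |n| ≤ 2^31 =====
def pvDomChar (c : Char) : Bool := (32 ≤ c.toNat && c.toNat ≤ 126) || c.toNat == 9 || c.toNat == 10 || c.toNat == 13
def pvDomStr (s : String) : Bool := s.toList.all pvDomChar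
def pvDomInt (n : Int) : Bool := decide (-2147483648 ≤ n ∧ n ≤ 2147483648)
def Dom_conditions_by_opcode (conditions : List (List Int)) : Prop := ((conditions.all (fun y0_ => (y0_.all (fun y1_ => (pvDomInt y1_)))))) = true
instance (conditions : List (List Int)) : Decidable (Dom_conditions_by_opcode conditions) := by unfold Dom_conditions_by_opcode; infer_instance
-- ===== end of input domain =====

-- B replaces A's three phases (sorted-unique opcode list, pre-allocation loop, fill loop) by a
-- selection-style while loop extracting the minimum remaining opcode and its whole group each round;
-- keys come out in increasing order with no sort call. Alternative decomposition, not claimed faster.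

-- c[0] : exact whenever c ≠ [] (guaranteed by Pre_); Python raises IndexError on c = [].
def pvOp (c : List Int) : Int := (PySem.List.pyGet? c 0).getD 0

-- ===== PORT A =====
def conditions_by_opcode (conditions : List (List Int)) : List (Int × List (List Int)) :=
  -- opcodes = sorted(set([_[0] for _ in conditions if len(_) > 0]))
  let opcodes :=
    PySem.List.sorted
      (PySem.Set.ofList ((conditions.filter (fun c => decide ((0:Int) < (c.length : Int)))).map pvOp))
      (fun x => x) false
  -- d = {}; for _ in opcodes: d[_] = list()
  let d0 : PySem.Dict Int (List (List Int)) :=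
    opcodes.foldl (fun d k => d.insert k []) PySem.Dict.empty
  -- for _ in conditions: d[_[0]].append(_)   — d[_[0]] exists under Pre_ (head is among opcodes),
  -- so modify's default [] is never used there; Python's KeyError cannot fire inside Pre_.
  let d := conditions.foldl (fun d c => d.modify (pvOp c) [] (fun l => l ++ [c])) d0
  d.items

-- ===== PORT B =====
-- the while loop: state = (remaining, d); terminates since each round removes the min-key group
def pvAltLoop (remaining : List (List Int)) (d : PySem.Dict Int (List (List Int))) :
    PySem.Dict Int (List (List Int)) :=
  if hne : remaining = [] then d
  else
    -- k = min(c[0] for c in remaining)   (remaining ≠ [], so min? is some)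
    let k := (PySem.List.min? (remaining.map pvOp) (fun x => x)).getD 0
    -- d[k] = [c for c in remaining if c[0] == k]
    let d' := d.insert k (remaining.filter (fun c => pvOp c == k))
    -- remaining = [c for c in remaining if c[0] != k]
    pvAltLoop (remaining.filter (fun c => !(pvOp c == k))) d'
termination_by remaining.length
decreasing_by
  · simp only [List.unattach_filter, List.map_subtype, List.unattach_attach]
    have hm : ∃ m, PySem.List.min? (remaining.map pvOp) (fun x => x) = some m := by
      rcases h : PySem.List.min? (remaining.map pvOp) (fun x => x) with _ | m
      · exact absurd (List.map_eq_nil_iff.mp ((PySem.List.min?_eq_none_iff _ _).mp h)) hne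
      · exact ⟨m, rfl⟩
    rcases hm with ⟨m, hm⟩
    have hmem : m ∈ remaining.map pvOp := PySem.List.min?_mem hm
    rcases List.mem_map.mp hmem with ⟨c, hc, hck⟩
    apply List.length_filter_lt_length_iff_exists.mpr
    exact ⟨c, hc, by simp [hm, hck]⟩

def conditions_by_opcode_alt (conditions : List (List Int)) : List (Int × List (List Int)) :=
  -- d = {}; remaining = list(conditions); while remaining: …; return d
  (pvAltLoop conditions PySem.Dict.empty).items

-- ===== PRECONDITION & SPEC =====
-- Pre_ excludes inputs containing an empty condition: there both A and B raise IndexError on c[0].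
def Pre_conditions_by_opcode (conditions : List (List Int)) : Prop :=
  ∀ c ∈ conditions, c ≠ []
instance (conditions : List (List Int)) : Decidable (Pre_conditions_by_opcode conditions) := by
  unfold Pre_conditions_by_opcode; infer_instance

def pvWitness_conditions_by_opcode : List (List Int) := [[1, 2], [3], [1], [2, 9]]

def Spec_conditions_by_opcode (conditions : List (List Int)) (out : List (Int × List (List Int))) : Prop := out = conditions_by_opcode_alt conditions
instance (conditions : List (List Int)) (out : List (Int × List (List Int))) : Decidable (Spec_conditions_by_opcode conditions out) := by unfold Spec_conditions_by_opcode; infer_instance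

-- ===== CLAIM (what is proved, stated in full; the proofs are below) =====
def Claim_equal_conditions_by_opcode : Prop := ∀ (conditions : List (List Int)), Dom_conditions_by_opcode conditions → Pre_conditions_by_opcode conditions → Spec_conditions_by_opcode conditions (conditions_by_opcode conditions)

-- ===== LEMMAS AND PROOFS =====

-- the common characterisation both ports are reduced to: sorted distinct opcodes, each with its filter
def pvGroups (conditions : List (List Int)) : List (Int × List (List Int)) :=
  (PySem.List.sorted (PySem.Set.ofList (conditions.map pvOp)) (fun x => x) false).map
    (fun k => (k, conditions.filter (fun c => pvOp c == k)))

-- Under Pre_, A's len-guard filter keeps everything.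
theorem pv_filter_id (conditions : List (List Int))
    (h : Pre_conditions_by_opcode conditions) :
    conditions.filter (fun c => decide ((0:Int) < (c.length : Int))) = conditions := by
  apply List.filter_eq_self.mpr
  intro c hc
  have := h c hc
  have : c.length ≠ 0 := by simpa [List.length_eq_zero_iff] using this
  simp; omega

-- A's grouping fold, read off pointwise.
theorem pv_fill_getD (conditions : List (List Int)) (d : PySem.Dict Int (List (List Int))) (k : Int) :
    (conditions.foldl (fun d c => d.modify (pvOp c) [] (fun l => l ++ [c])) d).getD k []
      = d.getD k [] ++ conditions.filter (fun c => pvOp c == k) := by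
  have h := PySem.Dict.getD_foldl_modify_append
      (l := conditions.map (fun c => (pvOp c, c))) (d := d) (c := k)
  rw [List.foldl_map] at h
  simpa [List.filter_map, List.map_map, Function.comp_def] using h

-- Keys of A's grouping fold.
theorem pv_fill_keys (conditions : List (List Int)) (d : PySem.Dict Int (List (List Int))) :
    (conditions.foldl (fun d c => d.modify (pvOp c) [] (fun l => l ++ [c])) d).keys
      = PySem.Set.update d.keys (conditions.map pvOp) :=
  PySem.Dict.keys_foldl_modify_key (key := pvOp) (f := fun _ c => fun l => l ++ [c]) ..

theorem pv_set_update_of_subset {α : Type} [BEq α] [LawfulBEq α] (l : List α) (s : PySem.Set α)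
    (h : ∀ x ∈ l, x ∈ s) : PySem.Set.update s l = s := by
  induction l generalizing s with
  | nil => rfl
  | cons x t ih =>
      have hx : x ∈ s := h x (by simp)
      have hadd : PySem.Set.add s x = s := by
        simp [PySem.Set.add, PySem.Set.contains, hx]
      have hstep : PySem.Set.update s (x :: t) = PySem.Set.update (PySem.Set.add s x) t := rfl
      rw [hstep, hadd, ih s (fun y hy => h y (List.mem_cons_of_mem _ hy))]

-- A equals the characterisation (under Pre_).
theorem pv_A_eq_groups (conditions : List (List Int))
    (h : Pre_conditions_by_opcode conditions) :
    conditions_by_opcode conditions = pvGroups conditions := by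
  unfold conditions_by_opcode pvGroups
  simp only [pv_filter_id conditions h]
  set H := conditions.map pvOp with hH
  set ks := PySem.List.sorted (PySem.Set.ofList H) (fun x => x) false with hks
  have hkpw : ks.Pairwise (· < ·) := PySem.List.sorted_ofList_pairwise_lt ..
  have hknd : ks.Nodup := hkpw.imp fun h => ne_of_lt h
  set d0 : PySem.Dict Int (List (List Int)) :=
    ks.foldl (fun d k => d.insert k []) PySem.Dict.empty with hd0
  have hd0items : d0.items = ks.map (fun k => (k, ([] : List (List Int)))) := by
    have := PySem.Dict.items_foldl_insert_fresh (l := ks) (k := fun x => x)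
        (v := fun _ => ([] : List (List Int))) (d := PySem.Dict.empty)
        (by intro a _; simp) (by simpa using hknd)
    simpa using this
  have hd0keys : d0.keys = ks := by
    simp [PySem.Dict.keys, hd0items, Function.comp_def]
  have hd0getD : ∀ k ∈ ks, d0.getD k [] = [] := by
    intro k hk
    have hmem : (k, ([] : List (List Int))) ∈ d0.items := by
      rw [hd0items]; exact List.mem_map_of_mem hk
    exact PySem.Dict.getD_of_mem_items d0 hmem (by rw [hd0keys]; exact hknd) []
  set df := conditions.foldl (fun d c => d.modify (pvOp c) [] (fun l => l ++ [c])) d0 with hdf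
  have hmemks : ∀ x ∈ H, x ∈ ks := by
    intro x hx
    rw [hks, PySem.List.mem_sorted]
    exact (PySem.Set.mem_ofList _ _).mpr hx
  have hdfkeys : df.keys = ks := by
    rw [hdf, pv_fill_keys, hd0keys, pv_set_update_of_subset _ _ hmemks]
  have hdfnd : df.keys.Nodup := by rw [hdfkeys]; exact hknd
  rw [PySem.Dict.items_eq_map_keys df hdfnd ([] : List (List Int)), hdfkeys]
  apply List.map_congr_left
  intro k hk
  rw [hdf, pv_fill_getD, hd0getD k hk]
  simp

-- one round of B pulls the head off the sorted distinct opcodes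
theorem pv_groups_step (remaining : List (List Int)) (m : Int)
    (hmin : PySem.List.min? (remaining.map pvOp) (fun x => x) = some m) :
    PySem.List.sorted (PySem.Set.ofList (remaining.map pvOp)) (fun x => x) false
      = m :: PySem.List.sorted
          (PySem.Set.ofList ((remaining.filter (fun c => !(pvOp c == m))).map pvOp))
          (fun x => x) false := by
  set H := remaining.map pvOp with hH
  set H' := (remaining.filter (fun c => !(pvOp c == m))).map pvOp with hH'
  set t := PySem.List.sorted (PySem.Set.ofList H') (fun x => x) false with ht
  have hmemH' : ∀ x, x ∈ H' ↔ (x ∈ H ∧ x ≠ m) := by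
    intro x
    constructor
    · intro hx
      rcases List.mem_map.mp hx with ⟨c, hc, hcx⟩
      have hc' := List.mem_filter.mp hc
      refine ⟨List.mem_map.mpr ⟨c, hc'.1, hcx⟩, ?_⟩
      intro hxm
      rw [← hcx] at hxm
      simp [hxm] at hc'
    · rintro ⟨hx, hxm⟩
      rcases List.mem_map.mp hx with ⟨c, hc, hcx⟩
      exact List.mem_map.mpr ⟨c, List.mem_filter.mpr ⟨hc, by simp [hcx, hxm]⟩, hcx⟩
  have hmemt : ∀ x, x ∈ t ↔ (x ∈ H ∧ x ≠ m) := by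
    intro x
    rw [ht, PySem.List.mem_sorted, PySem.Set.mem_ofList]
    exact hmemH' x
  have htpw : t.Pairwise (· < ·) := PySem.List.sorted_ofList_pairwise_lt ..
  have hmH : m ∈ H := PySem.List.min?_mem hmin
  have hmin' : ∀ y ∈ H, m ≤ y := by
    intro y hy
    simpa using PySem.List.min?_isMin hmin y hy
  have hpw : (m :: t).Pairwise (· < ·) := by
    refine List.Pairwise.cons ?_ htpw
    intro x hx
    rcases (hmemt x).mp hx with ⟨hxH, hxm⟩
    exact lt_of_le_of_ne (hmin' x hxH) (Ne.symm hxm)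
  have hnd : (m :: t).Nodup := hpw.imp fun h => ne_of_lt h
  have hperm : (m :: t).Perm (PySem.Set.ofList H) := by
    apply (List.perm_ext_iff_of_nodup hnd (PySem.Set.nodup_ofList H)).mpr
    intro x
    rw [PySem.Set.mem_ofList, List.mem_cons, hmemt]
    constructor
    · rintro (rfl | ⟨hx, _⟩) <;> [exact hmH; exact hx]
    · intro hx
      by_cases hxm : x = m
      · exact Or.inl hxm
      · exact Or.inr ⟨hx, hxm⟩
  exact PySem.List.sorted_id_eq_of_perm_of_pairwise _ _ hperm (hpw.imp fun h => le_of_lt h)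

-- B's loop, on the invariant that d's keys avoid every remaining opcode
theorem pv_altLoop_items (n : ℕ) : ∀ (remaining : List (List Int))
    (d : PySem.Dict Int (List (List Int))), remaining.length ≤ n → d.keys.Nodup →
    (∀ c ∈ remaining, pvOp c ∉ d.keys) →
    (pvAltLoop remaining d).items = d.items ++ pvGroups remaining := by
  induction n with
  | zero =>
      intro remaining d hlen _ _
      have : remaining = [] := List.eq_nil_of_length_eq_zero (Nat.le_zero.mp hlen)
      subst this
      rw [pvAltLoop]
      simp [pvGroups, PySem.Set.ofList, PySem.List.sorted_eq_nil_iff]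
  | succ n ih =>
      intro remaining d hlen hnd hfresh
      by_cases hne : remaining = []
      · subst hne
        rw [pvAltLoop]
        simp [pvGroups, PySem.Set.ofList, PySem.List.sorted_eq_nil_iff]
      rw [pvAltLoop]
      simp only [dif_neg hne]
      have hm : ∃ m, PySem.List.min? (remaining.map pvOp) (fun x => x) = some m := by
        rcases h : PySem.List.min? (remaining.map pvOp) (fun x => x) with _ | m
        · exact absurd (List.map_eq_nil_iff.mp ((PySem.List.min?_eq_none_iff _ _).mp h)) hne
        · exact ⟨m, rfl⟩
      rcases hm with ⟨m, hmin⟩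
      simp only [hmin, Option.getD_some]
      set grp := remaining.filter (fun c => pvOp c == m) with hgrp
      set rest := remaining.filter (fun c => !(pvOp c == m)) with hrest
      have hmH : m ∈ remaining.map pvOp := PySem.List.min?_mem hmin
      rcases List.mem_map.mp hmH with ⟨cm, hcm, hcmm⟩
      -- insert is fresh
      have hmfresh : ¬ m ∈ d.keys := by
        have := hfresh cm hcm; rwa [hcmm] at this
      have hitems' : (d.insert m grp).items = d.items ++ [(m, grp)] := by
        have := PySem.Dict.items_foldl_insert_fresh (l := [m]) (k := fun x => x)
            (v := fun _ => grp) (d := d)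
            (by intro a ha; simp at ha; subst ha
                rw [← Bool.not_eq_true, PySem.Dict.contains_iff_mem_keys]; exact hmfresh)
            (by simp)
        simpa using this
      have hkeys' : (d.insert m grp).keys = d.keys ++ [m] := by
        have := congrArg (List.map Prod.fst) hitems'
        simpa [PySem.Dict.keys] using this
      have hlen' : rest.length ≤ n := by
        have hlt : rest.length < remaining.length := by
          apply List.length_filter_lt_length_iff_exists.mpr
          exact ⟨cm, hcm, by simp [hcmm]⟩
        omega
      have hnd' : (d.insert m grp).keys.Nodup := by
        rw [hkeys', List.nodup_append]
        refine ⟨hnd, by simp, ?_⟩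
        intro a ha b hbm
        have hbm' : b = m := by simpa using hbm
        subst hbm'
        intro hab
        subst hab
        exact hmfresh ha
      have hfresh' : ∀ c ∈ rest, pvOp c ∉ (d.insert m grp).keys := by
        intro c hc
        have hc' := List.mem_filter.mp hc
        rw [hkeys']
        simp only [List.mem_append, List.mem_singleton]
        rintro (h1 | h2)
        · exact hfresh c hc'.1 h1
        · have := hc'.2; simp [h2] at this
      rw [ih rest (d.insert m grp) hlen' hnd' hfresh', hitems']
      -- pvGroups remaining = (m, grp) :: pvGroups rest
      have hdec := pv_groups_step remaining m hmin
      have hfilters : ∀ k, k ≠ m →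
          remaining.filter (fun c => pvOp c == k) = rest.filter (fun c => pvOp c == k) := by
        intro k hk
        rw [hrest, List.filter_filter]
        apply List.filter_congr
        intro c _
        by_cases h : pvOp c = k
        · subst h
          simp [hk]
        · simp [h]
      have hG : pvGroups remaining = (m, grp) :: pvGroups rest := by
        unfold pvGroups
        rw [hdec, ← hrest, List.map_cons, hgrp]
        congr 1
        apply List.map_congr_left
        intro k hk
        have hkpw : (PySem.List.sorted (PySem.Set.ofList (rest.map pvOp)) (fun x => x) false).Pairwise ((· < ·) : Int → Int → Prop) :=
          PySem.List.sorted_ofList_pairwise_lt ..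
        have hkmem : k ∈ rest.map pvOp := by
          have := (PySem.List.mem_sorted _ _ _ _).mp hk
          exact (PySem.Set.mem_ofList _ _).mp this
        have hkm : k ≠ m := by
          rcases List.mem_map.mp hkmem with ⟨c, hc, hck⟩
          have := (List.mem_filter.mp hc).2
          subst hck
          simpa using this
        rw [hfilters k hkm]
      rw [hG]
      simp

theorem pv_B_eq_groups (conditions : List (List Int)) :
    conditions_by_opcode_alt conditions = pvGroups conditions := by
  unfold conditions_by_opcode_alt
  have := pv_altLoop_items conditions.length conditions PySem.Dict.empty le_rfl
      (by simp [PySem.Dict.keys, PySem.Dict.empty]) (by simp [PySem.Dict.keys, PySem.Dict.empty])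
  simpa [PySem.Dict.items, PySem.Dict.empty] using this

-- ===== VERDICT (by name: the statement is the Claim_ definition above) =====
theorem conditions_by_opcode_spec : Claim_equal_conditions_by_opcode := by
  intro conditions _ hpre
  unfold Spec_conditions_by_opcode
  rw [pv_A_eq_groups conditions hpre, pv_B_eq_groups conditions]
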